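-- pv_equiv track=rewrite | github.com/BleedWatch/copy-fail-check | copy-fail-check.py | distro_family
-- ===== SOURCE A (Python) =====
-- def distro_family(os_info):
--     distro_id = os_info.get("ID", "").lower()
--     like = os_info.get("ID_LIKE", "").lower().split()
--     names = [distro_id] + like
--     if any(name in names for name in ("debian", "ubuntu")):
--         return "debian"
--     if any(name in names for name in ("rhel", "fedora", "centos", "amzn", "amazon")):
--         return "rhel"
--     if any(name in names for name in ("suse", "opensuse", "sles")):
--         return "suse"
--     return "unsupported"
-- ===== SOURCE B (Python) =====
-- _RANK = {"debian": 0, "ubuntu": 0,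
--          "rhel": 1, "fedora": 1, "centos": 1, "amzn": 1, "amazon": 1,
--          "suse": 2, "opensuse": 2, "sles": 2}
-- _FAMILY_OF_RANK = {0: "debian", 1: "rhel", 2: "suse"}
--
-- def distro_family(os_info):
--     # min-reduction over numeric priority ranks instead of staged membership scans
--     best = 3
--     for n in [os_info.get("ID", "").lower()] + os_info.get("ID_LIKE", "").lower().split():
--         best = min(best, _RANK.get(n, 3))
--     return _FAMILY_OF_RANK.get(best, "unsupported")
-- ===== Notes on version B (the rewrite author's own statement) =====
-- stated objective: alternative
-- what changed: Replaces A's three staged any(...) membership scans with early returns by a single numeric min-reduction: each name is mapped to a priority rank (0=debian,1=rhel,2=suse,3=unknown), one fold keeps the minimum rank, and the final rank is translated back to its family name.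
import Mathlib
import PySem

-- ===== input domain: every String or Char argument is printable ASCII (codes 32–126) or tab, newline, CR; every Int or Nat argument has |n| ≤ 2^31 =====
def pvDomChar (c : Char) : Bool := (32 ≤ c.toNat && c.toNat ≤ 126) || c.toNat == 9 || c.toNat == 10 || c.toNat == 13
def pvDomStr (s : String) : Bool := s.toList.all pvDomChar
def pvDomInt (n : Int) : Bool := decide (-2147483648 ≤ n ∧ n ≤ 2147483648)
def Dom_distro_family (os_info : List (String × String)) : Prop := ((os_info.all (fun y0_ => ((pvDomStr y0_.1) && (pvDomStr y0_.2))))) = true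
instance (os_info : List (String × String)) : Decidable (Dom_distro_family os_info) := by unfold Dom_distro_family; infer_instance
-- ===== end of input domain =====

-- B replaces A's three staged any(...) membership scans by a single numeric min-reduction:
-- each name maps to a priority rank (0=debian,1=rhel,2=suse,3=unknown), a fold keeps the
-- minimum rank, and the rank is translated back to a family name (alternative decomposition).


-- ===== PORT A =====
def distro_family (os_info : List (String × String)) : String :=
  let distro_id := PySem.Str.lower (PySem.Dict.getD (PySem.Dict.mk os_info) "ID" "")
  let like := PySem.Str.split₀ (PySem.Str.lower (PySem.Dict.getD (PySem.Dict.mk os_info) "ID_LIKE" ""))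
  let names := [distro_id] ++ like
  if (["debian", "ubuntu"].any (fun name => names.contains name)) then "debian"
  else if (["rhel", "fedora", "centos", "amzn", "amazon"].any (fun name => names.contains name)) then "rhel"
  else if (["suse", "opensuse", "sles"].any (fun name => names.contains name)) then "suse"
  else "unsupported"

-- ===== PORT B =====
def pvRank : PySem.Dict String Int := PySem.Dict.mk
  [("debian", 0), ("ubuntu", 0),
   ("rhel", 1), ("fedora", 1), ("centos", 1), ("amzn", 1), ("amazon", 1),
   ("suse", 2), ("opensuse", 2), ("sles", 2)]

def pvFamOfRank : PySem.Dict Int String := PySem.Dict.mk [(0, "debian"), (1, "rhel"), (2, "suse")]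

def distro_family_alt (os_info : List (String × String)) : String :=
  let names := [PySem.Str.lower (PySem.Dict.getD (PySem.Dict.mk os_info) "ID" "")]
      ++ PySem.Str.split₀ (PySem.Str.lower (PySem.Dict.getD (PySem.Dict.mk os_info) "ID_LIKE" ""))
  let best := names.foldl (fun b n => min b (PySem.Dict.getD pvRank n 3)) 3
  PySem.Dict.getD pvFamOfRank best "unsupported"

-- ===== PRECONDITION & SPEC =====
def Spec_distro_family (os_info : List (String × String)) (out : String) : Prop := out = distro_family_alt os_info
instance (os_info : List (String × String)) (out : String) : Decidable (Spec_distro_family os_info out) := by unfold Spec_distro_family; infer_instance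

-- ===== CLAIM (what is proved, stated in full; the proofs are below) =====
def Claim_equal_distro_family : Prop := ∀ (os_info : List (String × String)), Dom_distro_family os_info → Spec_distro_family os_info (distro_family os_info)

-- ===== LEMMAS AND PROOFS =====

-- closed form of the rank lookup
theorem pvRank_eq (n : String) :
    PySem.Dict.getD pvRank n 3 =
      if n = "debian" ∨ n = "ubuntu" then 0
      else if n = "rhel" ∨ n = "fedora" ∨ n = "centos" ∨ n = "amzn" ∨ n = "amazon" then 1
      else if n = "suse" ∨ n = "opensuse" ∨ n = "sles" then 2
      else 3 := by
  simp only [pvRank, PySem.Dict.getD, PySem.Dict.get?_mk_cons]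
  split_ifs <;> simp_all <;> tauto

theorem pvRank_nonneg (n : String) : 0 ≤ PySem.Dict.getD pvRank n 3 := by
  rw [pvRank_eq]; split_ifs <;> norm_num

theorem pvRank_le_zero_iff (n : String) :
    PySem.Dict.getD pvRank n 3 ≤ 0 ↔ (n = "debian" ∨ n = "ubuntu") := by
  rw [pvRank_eq]; split_ifs <;> simp_all

theorem pvRank_le_one_iff (n : String) :
    PySem.Dict.getD pvRank n 3 ≤ 1 ↔
      ((n = "debian" ∨ n = "ubuntu") ∨
       (n = "rhel" ∨ n = "fedora" ∨ n = "centos" ∨ n = "amzn" ∨ n = "amazon")) := by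
  rw [pvRank_eq]; split_ifs <;> simp_all

theorem pvRank_le_two_iff (n : String) :
    PySem.Dict.getD pvRank n 3 ≤ 2 ↔
      ((n = "debian" ∨ n = "ubuntu") ∨
       (n = "rhel" ∨ n = "fedora" ∨ n = "centos" ∨ n = "amzn" ∨ n = "amazon") ∨
       (n = "suse" ∨ n = "opensuse" ∨ n = "sles")) := by
  rw [pvRank_eq]; split_ifs <;> simp_all

-- the min-fold is ≤ k iff the seed is or some name's rank is
theorem fold_le_iff (names : List String) (b k : Int) :
    names.foldl (fun b n => min b (PySem.Dict.getD pvRank n 3)) b ≤ k ↔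
      b ≤ k ∨ ∃ n ∈ names, PySem.Dict.getD pvRank n 3 ≤ k := by
  induction names generalizing b with
  | nil => simp
  | cons hd tl ih =>
    simp only [List.foldl_cons, ih, min_le_iff, List.mem_cons]
    constructor
    · rintro ((h | h) | ⟨n, hn, hg⟩)
      · exact Or.inl h
      · exact Or.inr ⟨hd, Or.inl rfl, h⟩
      · exact Or.inr ⟨n, Or.inr hn, hg⟩
    · rintro (h | ⟨n, rfl | hn, hg⟩)
      · exact Or.inl (Or.inl h)
      · exact Or.inl (Or.inr hg)
      · exact Or.inr ⟨n, hn, hg⟩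

-- the min-fold stays above any common lower bound
theorem le_fold (names : List String) (b k : Int) (hb : k ≤ b)
    (h : ∀ n ∈ names, k ≤ PySem.Dict.getD pvRank n 3) :
    k ≤ names.foldl (fun b n => min b (PySem.Dict.getD pvRank n 3)) b := by
  induction names generalizing b with
  | nil => exact hb
  | cons hd tl ih =>
    simp only [List.foldl_cons]
    exact ih _ (le_min hb (h hd (List.mem_cons_self))) (fun n hn => h n (List.mem_cons_of_mem _ hn))

set_option maxHeartbeats 1000000 in
theorem distro_family_spec_core (names : List String) :
    (if (["debian", "ubuntu"].any (fun name => names.contains name)) then "debian"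
     else if (["rhel", "fedora", "centos", "amzn", "amazon"].any (fun name => names.contains name)) then "rhel"
     else if (["suse", "opensuse", "sles"].any (fun name => names.contains name)) then "suse"
     else "unsupported")
    = PySem.Dict.getD pvFamOfRank
        (names.foldl (fun b n => min b (PySem.Dict.getD pvRank n 3)) 3) "unsupported" := by
  set best := names.foldl (fun b n => min b (PySem.Dict.getD pvRank n 3)) 3 with hbest
  have h0 : 0 ≤ best := le_fold names 3 0 (by norm_num) (fun n _ => pvRank_nonneg n)
  have h3 : best ≤ 3 := by rw [hbest, fold_le_iff]; exact Or.inl le_rfl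
  have e0 : best ≤ 0 ↔ ∃ n ∈ names, (n = "debian" ∨ n = "ubuntu") := by
    rw [hbest, fold_le_iff]
    simp only [pvRank_le_zero_iff]; norm_num
  have e1 : best ≤ 1 ↔ ∃ n ∈ names,
      ((n = "debian" ∨ n = "ubuntu") ∨
       (n = "rhel" ∨ n = "fedora" ∨ n = "centos" ∨ n = "amzn" ∨ n = "amazon")) := by
    rw [hbest, fold_le_iff]
    simp only [pvRank_le_one_iff]; norm_num
  have e2 : best ≤ 2 ↔ ∃ n ∈ names,
      ((n = "debian" ∨ n = "ubuntu") ∨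
       (n = "rhel" ∨ n = "fedora" ∨ n = "centos" ∨ n = "amzn" ∨ n = "amazon") ∨
       (n = "suse" ∨ n = "opensuse" ∨ n = "sles")) := by
    rw [hbest, fold_le_iff]
    simp only [pvRank_le_two_iff]; norm_num
  have hC1 : (["debian", "ubuntu"].any (fun name => names.contains name)) =
      decide ("debian" ∈ names ∨ "ubuntu" ∈ names) := by simp
  have hC2 : (["rhel", "fedora", "centos", "amzn", "amazon"].any (fun name => names.contains name)) =
      decide ("rhel" ∈ names ∨ "fedora" ∈ names ∨ "centos" ∈ names ∨ "amzn" ∈ names ∨ "amazon" ∈ names) := by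
    simp
  have hC3 : (["suse", "opensuse", "sles"].any (fun name => names.contains name)) =
      decide ("suse" ∈ names ∨ "opensuse" ∈ names ∨ "sles" ∈ names) := by simp
  rw [hC1, hC2, hC3]
  by_cases c1 : ("debian" ∈ names ∨ "ubuntu" ∈ names)
  · have : best = 0 := by
      have : best ≤ 0 := e0.mpr (by rcases c1 with h | h <;> exact ⟨_, h, by simp⟩)
      omega
    simp [c1, this, pvFamOfRank, PySem.Dict.getD, PySem.Dict.get?]
  · have n0 : ¬ best ≤ 0 := by
      rw [e0]; rintro ⟨n, hn, rfl | rfl⟩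
      exacts [c1 (Or.inl hn), c1 (Or.inr hn)]
    by_cases c2 : ("rhel" ∈ names ∨ "fedora" ∈ names ∨ "centos" ∈ names ∨ "amzn" ∈ names ∨ "amazon" ∈ names)
    · have : best = 1 := by
        have : best ≤ 1 := e1.mpr (by
          rcases c2 with h | h | h | h | h <;> exact ⟨_, h, by simp⟩)
        omega
      simp [c1, c2, this, pvFamOfRank, PySem.Dict.getD, PySem.Dict.get?]
    · have n1 : ¬ best ≤ 1 := by
        rw [e1]
        rintro ⟨n, hn, (rfl | rfl) | (rfl | rfl | rfl | rfl | rfl)⟩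
        exacts [c1 (Or.inl hn), c1 (Or.inr hn), c2 (Or.inl hn), c2 (Or.inr (Or.inl hn)),
          c2 (Or.inr (Or.inr (Or.inl hn))), c2 (Or.inr (Or.inr (Or.inr (Or.inl hn)))),
          c2 (Or.inr (Or.inr (Or.inr (Or.inr hn))))]
      by_cases c3 : ("suse" ∈ names ∨ "opensuse" ∈ names ∨ "sles" ∈ names)
      · have : best = 2 := by
          have : best ≤ 2 := e2.mpr (by rcases c3 with h | h | h <;> exact ⟨_, h, by simp⟩)
          omega
        simp [c1, c2, c3, this, pvFamOfRank, PySem.Dict.getD, PySem.Dict.get?]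
      · have n2 : ¬ best ≤ 2 := by
          rw [e2]
          rintro ⟨n, hn, (rfl | rfl) | (rfl | rfl | rfl | rfl | rfl) | (rfl | rfl | rfl)⟩
          exacts [c1 (Or.inl hn), c1 (Or.inr hn), c2 (Or.inl hn), c2 (Or.inr (Or.inl hn)),
            c2 (Or.inr (Or.inr (Or.inl hn))), c2 (Or.inr (Or.inr (Or.inr (Or.inl hn)))),
            c2 (Or.inr (Or.inr (Or.inr (Or.inr hn)))), c3 (Or.inl hn), c3 (Or.inr (Or.inl hn)),
            c3 (Or.inr (Or.inr hn))]
        have : best = 3 := by omega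
        simp [c1, c2, c3, this, pvFamOfRank, PySem.Dict.getD, PySem.Dict.get?]

-- ===== VERDICT (by name: the statement is the Claim_ definition above) =====
theorem distro_family_spec : Claim_equal_distro_family := by
  intro os_info _
  unfold Spec_distro_family distro_family distro_family_alt
  exact distro_family_spec_core _
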